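-- pv_equiv track=rewrite | github.com/vmoranv/aolamya | 时空乱局/n阶幻方所有解.py | generate_all_symmetries
-- ===== SOURCE A (Python) =====
-- def generate_all_symmetries(magic_square):
--     """生成给定幻方的所有对称解（旋转和镜像）"""
--     symmetries = []
--     current = magic_square
--     n = len(magic_square)
--
--     # 原始解
--     symmetries.append([row[:] for row in current])
--
--     # 旋转90度、180度、270度
--     for _ in range(3):
--         current = [[current[n - j - 1][i] for j in range(n)] for i in range(n)]
--         symmetries.append([row[:] for row in current])
--
--     # 镜像翻转
--     mirrored = [row[::-1] for row in magic_square]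
--     symmetries.append([row[:] for row in mirrored])
--
--     # 镜像后的旋转
--     current = mirrored
--     for _ in range(3):
--         current = [[current[n - j - 1][i] for j in range(n)] for i in range(n)]
--         symmetries.append([row[:] for row in current])
--
--     # 去重
--     unique_symmetries = []
--     seen = set()
--
--     for square in symmetries:
--         square_tuple = tuple(tuple(row) for row in square)
--         if square_tuple not in seen:
--             seen.add(square_tuple)
--             unique_symmetries.append([list(row) for row in square])
--
--     return unique_symmetries
-- ===== SOURCE B (Python) =====
-- def generate_all_symmetries(magic_square):
--     """生成给定幻方的所有对称解（旋转和镜像）"""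
--     n = len(magic_square)
--     # closed-form index maps from the ORIGINAL square, in the order
--     # identity, R90, R180, R270, mirror, mirror+R90, mirror+R180, mirror+R270
--     index_maps = [
--         lambda i, j: (i, j),
--         lambda i, j: (n - 1 - j, i),
--         lambda i, j: (n - 1 - i, n - 1 - j),
--         lambda i, j: (j, n - 1 - i),
--         lambda i, j: (i, n - 1 - j),
--         lambda i, j: (n - 1 - j, n - 1 - i),
--         lambda i, j: (n - 1 - i, j),
--         lambda i, j: (j, i),
--     ]
--     unique_symmetries = []
--     seen = set()
--     for f in index_maps:
--         square = [[magic_square[a][b] for a, b in (f(i, j) for j in range(n))]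
--                   for i in range(n)]
--         key = tuple(tuple(row) for row in square)
--         if key not in seen:
--             seen.add(key)
--             unique_symmetries.append(square)
--     return unique_symmetries
-- ===== Notes on version B (the rewrite author's own statement) =====
-- stated objective: alternative
-- what changed: Replaces A's sequential rotation chain (each matrix computed from the previous one, plus a separate mirrored chain) by eight independent closed-form index maps applied directly to the original square, emitted in A's order and deduplicated in one pass.
-- outside the precondition, e.g. on generate_all_symmetries([[1, 2]]): A returns [[[1, 2]], [[1]], [[2, 1]], [[2]]], B returns [[[1]]]
import Mathlib
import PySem

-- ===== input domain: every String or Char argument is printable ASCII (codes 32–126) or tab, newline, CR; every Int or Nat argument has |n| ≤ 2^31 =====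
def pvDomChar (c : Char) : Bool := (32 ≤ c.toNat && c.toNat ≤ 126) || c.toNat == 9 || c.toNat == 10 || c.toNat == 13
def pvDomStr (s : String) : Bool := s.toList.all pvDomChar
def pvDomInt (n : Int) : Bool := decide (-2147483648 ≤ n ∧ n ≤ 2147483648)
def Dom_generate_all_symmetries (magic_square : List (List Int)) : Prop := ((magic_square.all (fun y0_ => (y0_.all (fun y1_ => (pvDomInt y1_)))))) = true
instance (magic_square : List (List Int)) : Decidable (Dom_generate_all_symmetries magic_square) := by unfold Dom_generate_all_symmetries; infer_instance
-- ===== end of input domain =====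

-- B replaces A's sequential rotation chains by eight independent closed-form index maps
-- applied to the original square (alternative decomposition, same cost).

-- shared helper of both ports: m[a][b]; Python raises (IndexError) where the default
-- fires, and those inputs are outside Pre_.
def pvGetA (m : List (List Int)) (a b : Int) : Int :=
  PySem.List.pyGetD (PySem.List.pyGetD m a []) b 0

-- ===== PORT A =====

-- mirrored = [row[::-1] for row in magic_square]
def pvMir (M : List (List Int)) : List (List Int) :=
  M.map (fun row => (PySem.List.slice? row none none (-1)).getD [])

-- one step of A's loop: current = [[current[n - j - 1][i] for j in range(n)] for i in range(n)]
def pvRotA (n : Int) (cur : List (List Int)) : List (List Int) :=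
  (PySem.List.pyRange 0 n 1).map (fun i =>
    (PySem.List.pyRange 0 n 1).map (fun j => pvGetA cur (n - j - 1) i))

-- row copies ([row[:] for row in …], [list(row) for row in …]) are identity on immutable Lean lists
def generate_all_symmetries (magic_square : List (List Int)) : List (List (List Int)) :=
  let n : Int := magic_square.length
  let s0 := magic_square
  let s1 := pvRotA n s0
  let s2 := pvRotA n s1
  let s3 := pvRotA n s2
  let m0 := pvMir magic_square
  let m1 := pvRotA n m0
  let m2 := pvRotA n m1
  let m3 := pvRotA n m2
  let symmetries := [s0, s1, s2, s3, m0, m1, m2, m3]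
  (symmetries.foldl
    (fun (st : PySem.Set (List (List Int)) × List (List (List Int))) square =>
      if PySem.Set.contains st.1 square then st
      else (PySem.Set.add st.1 square, st.2 ++ [square]))
    (PySem.Set.empty, [])).2

-- ===== PORT B =====
-- the eight closed-form index maps, in B's fixed order
def pvMaps (n : Int) : List (Int → Int → Int × Int) :=
  [ fun i j => (i, j),
    fun i j => (n - 1 - j, i),
    fun i j => (n - 1 - i, n - 1 - j),
    fun i j => (j, n - 1 - i),
    fun i j => (i, n - 1 - j),
    fun i j => (n - 1 - j, n - 1 - i),
    fun i j => (n - 1 - i, j),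
    fun i j => (j, i) ]

def generate_all_symmetries_alt (magic_square : List (List Int)) : List (List (List Int)) :=
  let n : Int := magic_square.length
  ((pvMaps n).foldl
    (fun (st : PySem.Set (List (List Int)) × List (List (List Int))) f =>
      let square := (PySem.List.pyRange 0 n 1).map (fun i =>
        (PySem.List.pyRange 0 n 1).map (fun j =>
          pvGetA magic_square (f i j).1 (f i j).2))
      if PySem.Set.contains st.1 square then st
      else (PySem.Set.add st.1 square, st.2 ++ [square]))
    (PySem.Set.empty, [])).2

-- ===== PRECONDITION & SPEC =====
-- Pre_ restricts to the natural domain (square matrices): on ragged input A either raises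
-- IndexError (a row shorter than n) or returns an accidental mix of whole-row mirrors and
-- n-truncated rotations (a row longer than n) that no caller could intend.
def Pre_generate_all_symmetries (magic_square : List (List Int)) : Prop :=
  ∀ row ∈ magic_square, row.length = magic_square.length

instance (magic_square : List (List Int)) : Decidable (Pre_generate_all_symmetries magic_square) := by
  unfold Pre_generate_all_symmetries; infer_instance

def pvWitness_generate_all_symmetries : List (List Int) := [[1, 2], [3, 4]]

def Spec_generate_all_symmetries (magic_square : List (List Int)) (out : List (List (List Int))) : Prop := out = generate_all_symmetries_alt magic_square
instance (magic_square : List (List Int)) (out : List (List (List Int))) : Decidable (Spec_generate_all_symmetries magic_square out) := by unfold Spec_generate_all_symmetries; infer_instance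

-- ===== CLAIM (what is proved, stated in full; the proofs are below) =====
def Claim_equal_generate_all_symmetries : Prop := ∀ (magic_square : List (List Int)), Dom_generate_all_symmetries magic_square → Pre_generate_all_symmetries magic_square → Spec_generate_all_symmetries magic_square (generate_all_symmetries magic_square)

-- ===== LEMMAS AND PROOFS =====

-- an n×n matrix given by an index function
def pvMk (n : Int) (g : Int → Int → Int) : List (List Int) :=
  (PySem.List.pyRange 0 n 1).map (fun i => (PySem.List.pyRange 0 n 1).map (g i))

-- the (shared) dedup step, used by the proof to name both ports' identical fold body
def pvStep (st : PySem.Set (List (List Int)) × List (List (List Int)))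
    (square : List (List Int)) : PySem.Set (List (List Int)) × List (List (List Int)) :=
  if PySem.Set.contains st.1 square then st
  else (PySem.Set.add st.1 square, st.2 ++ [square])

theorem pvGetA_mk (n : Int) (g : Int → Int → Int) (a b : Int)
    (ha0 : 0 ≤ a) (ha : a < n) (hb0 : 0 ≤ b) (hb : b < n) :
    pvGetA (pvMk n g) a b = g a b := by
  unfold pvGetA pvMk
  rw [PySem.List.pyGetD_map_pyRange_of_nonneg _ n a _ ha0 ha,
      PySem.List.pyGetD_map_pyRange_of_nonneg _ n b _ hb0 hb]

theorem pvMk_congr (n : Int) (g h : Int → Int → Int)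
    (H : ∀ i j, 0 ≤ i → i < n → 0 ≤ j → j < n → g i j = h i j) :
    pvMk n g = pvMk n h := by
  unfold pvMk
  refine List.map_congr_left (fun i hi => ?_)
  rw [PySem.List.mem_pyRange_one] at hi
  refine List.map_congr_left (fun j hj => ?_)
  rw [PySem.List.mem_pyRange_one] at hj
  exact H i j hi.1 hi.2 hj.1 hj.2

theorem pvRotA_mk (n : Int) (cur : List (List Int)) :
    pvRotA n cur = pvMk n (fun i j => pvGetA cur (n - j - 1) i) := rfl

-- a square matrix is pvMk of its own entries
theorem pvMk_eq_self (M : List (List Int))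
    (hsq : ∀ row ∈ M, row.length = M.length) :
    pvMk (M.length : Int) (fun i j => pvGetA M i j) = M := by
  have hlenM : PySem.List.len M = ((M.length : Nat) : Int) := by simp [PySem.List.len]
  unfold pvMk pvGetA
  conv_rhs => rw [← PySem.List.map_pyGetD_pyRange_zero M ([] : List Int)]
  rw [hlenM]
  refine List.map_congr_left (fun i hi => ?_)
  rw [PySem.List.mem_pyRange_one] at hi
  have hrow : PySem.List.pyGetD M i [] ∈ M := by
    apply PySem.List.pyGetD_mem
    constructor <;> omega
  have hlenrow : PySem.List.len (PySem.List.pyGetD M i []) = ((M.length : Nat) : Int) := by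
    simp [PySem.List.len, hsq _ hrow]
  rw [show ((M.length : Nat) : Int) = PySem.List.len (PySem.List.pyGetD M i []) from hlenrow.symm]
  exact PySem.List.map_pyGetD_pyRange_zero _ 0

-- the mirrored matrix, on a square input, as pvMk
theorem pvMir_eq_mk (M : List (List Int))
    (hsq : ∀ row ∈ M, row.length = M.length) :
    pvMir M = pvMk (M.length : Int) (fun i j => pvGetA M i ((M.length : Int) - 1 - j)) := by
  have hrev : pvMir M = M.map (fun row => row.reverse) := by
    unfold pvMir
    refine List.map_congr_left (fun row _ => ?_)
    rw [PySem.List.slice?_none_none_neg_one]; rfl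
  have hsq' : ∀ row ∈ M.map (fun r => r.reverse),
      row.length = (M.map (fun r => r.reverse)).length := by
    intro row hrow
    rw [List.mem_map] at hrow
    obtain ⟨r, hr, rfl⟩ := hrow
    simp [hsq r hr]
  have h := pvMk_eq_self (M.map (fun r => r.reverse)) hsq'
  rw [List.length_map] at h
  rw [hrev, ← h]
  refine pvMk_congr _ _ _ (fun i j hi0 hi hj0 hj => ?_)
  unfold pvGetA
  have hiN : i.toNat < M.length := by omega
  have hjN : j.toNat < M.length := by omega
  rw [PySem.List.pyGetD_eq_getElem _ _ hi0 (by simpa using hi),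
      PySem.List.pyGetD_eq_getElem M ([] : List Int) hi0 (by simpa using hi)]
  rw [List.getElem_map]
  have hrowlen : (M[i.toNat]).length = M.length := hsq _ (List.getElem_mem hiN)
  rw [PySem.List.pyGetD_eq_getElem _ (0 : Int) hj0
        (by simp [hrowlen]; omega),
      PySem.List.pyGetD_eq_getElem _ (0 : Int) (by omega)
        (by simp [hrowlen]; omega)]
  rw [List.getElem_reverse]
  have hidx : (M[i.toNat]).length - 1 - j.toNat = ((M.length : Int) - 1 - j).toNat := by
    rw [hrowlen]; omega
  simp [hidx]

-- ===== VERDICT (by name: the statement is the Claim_ definition above) =====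
theorem generate_all_symmetries_spec : Claim_equal_generate_all_symmetries := by
  intro M _ hsq
  unfold Spec_generate_all_symmetries
  show generate_all_symmetries M = generate_all_symmetries_alt M
  have e1 : pvRotA (M.length : Int) M
      = pvMk (M.length : Int) (fun i j => pvGetA M ((M.length : Int) - 1 - j) i) := by
    rw [pvRotA_mk]
    refine pvMk_congr _ _ _ (fun i j _ _ _ _ => ?_)
    rw [show (M.length : Int) - j - 1 = (M.length : Int) - 1 - j from by ring]
  have e2 : pvRotA (M.length : Int)
        (pvMk (M.length : Int) (fun i j => pvGetA M ((M.length : Int) - 1 - j) i))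
      = pvMk (M.length : Int) (fun i j => pvGetA M ((M.length : Int) - 1 - i) ((M.length : Int) - 1 - j)) := by
    rw [pvRotA_mk]
    refine pvMk_congr _ _ _ (fun i j hi0 hi hj0 hj => ?_)
    rw [pvGetA_mk _ _ _ _ (by omega) (by omega) hi0 hi]
    show pvGetA M ((M.length : Int) - 1 - i) ((M.length : Int) - j - 1) = _
    rw [show (M.length : Int) - j - 1 = (M.length : Int) - 1 - j from by ring]
  have e3 : pvRotA (M.length : Int)
        (pvMk (M.length : Int) (fun i j => pvGetA M ((M.length : Int) - 1 - i) ((M.length : Int) - 1 - j)))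
      = pvMk (M.length : Int) (fun i j => pvGetA M j ((M.length : Int) - 1 - i)) := by
    rw [pvRotA_mk]
    refine pvMk_congr _ _ _ (fun i j hi0 hi hj0 hj => ?_)
    rw [pvGetA_mk _ _ _ _ (by omega) (by omega) hi0 hi]
    show pvGetA M ((M.length : Int) - 1 - ((M.length : Int) - j - 1)) ((M.length : Int) - 1 - i) = _
    rw [show (M.length : Int) - 1 - ((M.length : Int) - j - 1) = j from by ring]
  have e4 : pvMir M
      = pvMk (M.length : Int) (fun i j => pvGetA M i ((M.length : Int) - 1 - j)) :=
    pvMir_eq_mk M hsq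
  have e5 : pvRotA (M.length : Int)
        (pvMk (M.length : Int) (fun i j => pvGetA M i ((M.length : Int) - 1 - j)))
      = pvMk (M.length : Int) (fun i j => pvGetA M ((M.length : Int) - 1 - j) ((M.length : Int) - 1 - i)) := by
    rw [pvRotA_mk]
    refine pvMk_congr _ _ _ (fun i j hi0 hi hj0 hj => ?_)
    rw [pvGetA_mk _ _ _ _ (by omega) (by omega) hi0 hi]
    show pvGetA M ((M.length : Int) - j - 1) ((M.length : Int) - 1 - i) = _
    rw [show (M.length : Int) - j - 1 = (M.length : Int) - 1 - j from by ring]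
  have e6 : pvRotA (M.length : Int)
        (pvMk (M.length : Int) (fun i j => pvGetA M ((M.length : Int) - 1 - j) ((M.length : Int) - 1 - i)))
      = pvMk (M.length : Int) (fun i j => pvGetA M ((M.length : Int) - 1 - i) j) := by
    rw [pvRotA_mk]
    refine pvMk_congr _ _ _ (fun i j hi0 hi hj0 hj => ?_)
    rw [pvGetA_mk _ _ _ _ (by omega) (by omega) hi0 hi]
    show pvGetA M ((M.length : Int) - 1 - i) ((M.length : Int) - 1 - ((M.length : Int) - j - 1)) = _
    rw [show (M.length : Int) - 1 - ((M.length : Int) - j - 1) = j from by ring]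
  have e7 : pvRotA (M.length : Int)
        (pvMk (M.length : Int) (fun i j => pvGetA M ((M.length : Int) - 1 - i) j))
      = pvMk (M.length : Int) (fun i j => pvGetA M j i) := by
    rw [pvRotA_mk]
    refine pvMk_congr _ _ _ (fun i j hi0 hi hj0 hj => ?_)
    rw [pvGetA_mk _ _ _ _ (by omega) (by omega) hi0 hi]
    show pvGetA M ((M.length : Int) - 1 - ((M.length : Int) - j - 1)) i = _
    rw [show (M.length : Int) - 1 - ((M.length : Int) - j - 1) = j from by ring]
  show (([M,
      pvRotA (M.length : Int) M,
      pvRotA (M.length : Int) (pvRotA (M.length : Int) M),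
      pvRotA (M.length : Int) (pvRotA (M.length : Int) (pvRotA (M.length : Int) M)),
      pvMir M,
      pvRotA (M.length : Int) (pvMir M),
      pvRotA (M.length : Int) (pvRotA (M.length : Int) (pvMir M)),
      pvRotA (M.length : Int) (pvRotA (M.length : Int) (pvRotA (M.length : Int) (pvMir M)))] :
        List (List (List Int))).foldl pvStep (PySem.Set.empty, [])).2
    = (([pvMk (M.length : Int) (fun i j => pvGetA M i j),
      pvMk (M.length : Int) (fun i j => pvGetA M ((M.length : Int) - 1 - j) i),
      pvMk (M.length : Int) (fun i j => pvGetA M ((M.length : Int) - 1 - i) ((M.length : Int) - 1 - j)),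
      pvMk (M.length : Int) (fun i j => pvGetA M j ((M.length : Int) - 1 - i)),
      pvMk (M.length : Int) (fun i j => pvGetA M i ((M.length : Int) - 1 - j)),
      pvMk (M.length : Int) (fun i j => pvGetA M ((M.length : Int) - 1 - j) ((M.length : Int) - 1 - i)),
      pvMk (M.length : Int) (fun i j => pvGetA M ((M.length : Int) - 1 - i) j),
      pvMk (M.length : Int) (fun i j => pvGetA M j i)] :
        List (List (List Int))).foldl pvStep (PySem.Set.empty, [])).2
  suffices hlist : ([M,
      pvRotA (M.length : Int) M,
      pvRotA (M.length : Int) (pvRotA (M.length : Int) M),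
      pvRotA (M.length : Int) (pvRotA (M.length : Int) (pvRotA (M.length : Int) M)),
      pvMir M,
      pvRotA (M.length : Int) (pvMir M),
      pvRotA (M.length : Int) (pvRotA (M.length : Int) (pvMir M)),
      pvRotA (M.length : Int) (pvRotA (M.length : Int) (pvRotA (M.length : Int) (pvMir M)))] :
        List (List (List Int)))
    = ([pvMk (M.length : Int) (fun i j => pvGetA M i j),
      pvMk (M.length : Int) (fun i j => pvGetA M ((M.length : Int) - 1 - j) i),
      pvMk (M.length : Int) (fun i j => pvGetA M ((M.length : Int) - 1 - i) ((M.length : Int) - 1 - j)),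
      pvMk (M.length : Int) (fun i j => pvGetA M j ((M.length : Int) - 1 - i)),
      pvMk (M.length : Int) (fun i j => pvGetA M i ((M.length : Int) - 1 - j)),
      pvMk (M.length : Int) (fun i j => pvGetA M ((M.length : Int) - 1 - j) ((M.length : Int) - 1 - i)),
      pvMk (M.length : Int) (fun i j => pvGetA M ((M.length : Int) - 1 - i) j),
      pvMk (M.length : Int) (fun i j => pvGetA M j i)] :
        List (List (List Int))) by
    rw [hlist]
  rw [e1, e2, e3, e4, e5, e6, e7]
  congr 1
  exact (pvMk_eq_self M hsq).symm
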